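-- pv_equiv track=rewrite | github.com/gigo-gigo/atcoder | abc/abc449/c.py | solve
-- ===== SOURCE A (Python) =====
-- from bisect import bisect_left, bisect_right
-- from collections import defaultdict
--
-- def solve(N, L, R, S):
--     X = defaultdict(list)
--     for i, s in enumerate(S):
--         X[s].append(i)
--
--     ans = 0
--     for A in X.values():
--         for i in A:
--             m = bisect_right(A, i + R) - bisect_left(A, i + L)
--             ans += m
--
--     return ans
-- ===== SOURCE B (Python) =====
-- def solve(N, L, R, S):
--     groups = {}
--     for i, c in enumerate(S):
--         groups.setdefault(c, []).append(i)
--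
--     ans = 0
--     for A in groups.values():
--         n = len(A)
--         lo = hi = 0
--         for x in A:
--             while lo < n and A[lo] < x + L:
--                 lo += 1
--             while hi < n and A[hi] <= x + R:
--                 hi += 1
--             ans += hi - lo
--     return ans
-- ===== Notes on version B (the rewrite author's own statement) =====
-- stated objective: faster
-- what changed: Replaces the per-element binary searches (bisect_left/bisect_right on each index list) with two monotone sliding pointers per list, exploiting that the query thresholds increase along the sorted index list.
import Mathlib
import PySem

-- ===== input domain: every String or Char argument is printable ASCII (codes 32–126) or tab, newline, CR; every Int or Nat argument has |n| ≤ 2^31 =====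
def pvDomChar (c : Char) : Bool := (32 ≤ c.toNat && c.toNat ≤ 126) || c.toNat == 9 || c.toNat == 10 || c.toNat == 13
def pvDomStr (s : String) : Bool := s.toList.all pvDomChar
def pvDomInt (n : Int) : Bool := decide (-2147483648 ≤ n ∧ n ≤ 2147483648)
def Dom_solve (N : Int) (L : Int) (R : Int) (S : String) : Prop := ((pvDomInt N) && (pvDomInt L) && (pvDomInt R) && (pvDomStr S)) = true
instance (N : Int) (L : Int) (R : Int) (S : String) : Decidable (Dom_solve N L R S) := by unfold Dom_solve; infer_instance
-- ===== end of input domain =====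

-- B replaces A's per-element binary searches by two monotone sliding pointers per index list (objective: faster).

-- ===== PORT A =====
-- X[s].append(i) over enumerate(S): a defaultdict(list) grouping loop.
def solveGroup (cs : List Char) : PySem.Dict Char (List Int) :=
  (PySem.List.enumerate cs 0).foldl (fun d p => d.modify p.2 ([] : List Int) (· ++ [p.1])) PySem.Dict.empty

def solve (N : Int) (L : Int) (R : Int) (S : String) : Int :=
  let X := solveGroup S.toList
  X.values.foldl (fun ans A =>
    A.foldl (fun ans i =>
      ans + ((PySem.List.bisectRight A (i + R) : Int) - (PySem.List.bisectLeft A (i + L) : Int))) ans) 0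

-- ===== PORT B =====
-- while lo < n and p(A[lo]): lo += 1   (the sliding-pointer advance)
def solveAdv (A : List Int) (p : Int → Bool) (lo : Nat) : Nat :=
  if h : lo < A.length then
    if p A[lo] then solveAdv A p (lo + 1) else lo
  else lo
termination_by A.length - lo

-- Source B builds 'groups' with the same setdefault/append loop as A's defaultdict loop.
def solve_alt (N : Int) (L : Int) (R : Int) (S : String) : Int :=
  let groups := solveGroup S.toList
  groups.values.foldl (fun ans A =>
    (A.foldl (fun (st : Nat × Nat × Int) x =>
      let lo := solveAdv A (fun y => decide (y < x + L)) st.1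
      let hi := solveAdv A (fun y => decide (y ≤ x + R)) st.2.1
      (lo, hi, st.2.2 + ((hi : Int) - (lo : Int)))) (0, 0, ans)).2.2) 0

-- ===== PRECONDITION & SPEC =====
def Spec_solve (N : Int) (L : Int) (R : Int) (S : String) (out : Int) : Prop := out = solve_alt N L R S
instance (N : Int) (L : Int) (R : Int) (S : String) (out : Int) : Decidable (Spec_solve N L R S out) := by unfold Spec_solve; infer_instance

-- ===== CLAIM (what is proved, stated in full; the proofs are below) =====
def Claim_equal_solve : Prop := ∀ (N : Int) (L : Int) (R : Int) (S : String), Dom_solve N L R S → Spec_solve N L R S (solve N L R S)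

-- ===== LEMMAS AND PROOFS =====

-- the advance loop lands exactly at the split point c of a true-prefix/false-suffix predicate
lemma solveAdv_eq (A : List Int) (p : Int → Bool) (c : Nat)
    (hc : c ≤ A.length)
    (htrue : ∀ j (hj : j < A.length), j < c → p A[j] = true)
    (hfalse : ∀ j (hj : j < A.length), c ≤ j → p A[j] = false)
    (lo : Nat) (hlo : lo ≤ c) : solveAdv A p lo = c := by
  fun_induction solveAdv A p lo with
  | case1 lo h hp ih =>
      apply ih
      rcases Nat.lt_or_ge lo c with h' | h'
      · exact h'
      · simp [hfalse lo h h'] at hp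
  | case2 lo h hp =>
      rcases Nat.lt_or_ge lo c with h' | h'
      · simp [htrue lo h h'] at hp
      · omega
  | case3 lo h => omega

lemma bisectLeft_mono (A : List Int) (hA : A.Pairwise (· ≤ ·)) {t t' : Int} (h : t ≤ t') :
    PySem.List.bisectLeft A t ≤ PySem.List.bisectLeft A t' := by
  obtain ⟨hb1, hb2, hb3⟩ := PySem.List.bisectLeft_spec A t hA
  obtain ⟨hb1', hb2', hb3'⟩ := PySem.List.bisectLeft_spec A t' hA
  by_contra hcon
  push Not at hcon
  have hj : PySem.List.bisectLeft A t' < A.length := lt_of_lt_of_le hcon hb1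
  have h1 := hb2 _ hj hcon
  have h2 := hb3' _ hj (le_refl _)
  omega

lemma bisectRight_mono (A : List Int) (hA : A.Pairwise (· ≤ ·)) {t t' : Int} (h : t ≤ t') :
    PySem.List.bisectRight A t ≤ PySem.List.bisectRight A t' := by
  obtain ⟨hb1, hb2, hb3⟩ := PySem.List.bisectRight_spec A t hA
  obtain ⟨hb1', hb2', hb3'⟩ := PySem.List.bisectRight_spec A t' hA
  by_contra hcon
  push Not at hcon
  have hj : PySem.List.bisectRight A t' < A.length := lt_of_lt_of_le hcon hb1
  have h1 := hb2 _ hj hcon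
  have h2 := hb3' _ hj (le_refl _)
  omega

-- the two-pointer fold over a suffix s of the sorted list A equals A's bisect sum
lemma tp_go (L R : Int) (A : List Int) (hA : A.Pairwise (· ≤ ·)) :
    ∀ (s : List Int), s.Pairwise (· ≤ ·) →
    ∀ (lo hi : Nat) (ans : Int),
    (∀ x ∈ s, lo ≤ PySem.List.bisectLeft A (x + L)) →
    (∀ x ∈ s, hi ≤ PySem.List.bisectRight A (x + R)) →
    (s.foldl (fun (st : Nat × Nat × Int) x =>
      let lo := solveAdv A (fun y => decide (y < x + L)) st.1
      let hi := solveAdv A (fun y => decide (y ≤ x + R)) st.2.1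
      (lo, hi, st.2.2 + ((hi : Int) - (lo : Int)))) (lo, hi, ans)).2.2
    = s.foldl (fun ans i =>
        ans + ((PySem.List.bisectRight A (i + R) : Int) - (PySem.List.bisectLeft A (i + L) : Int))) ans := by
  intro s
  induction s with
  | nil => intro _ lo hi ans _ _; rfl
  | cons x t ih =>
      intro hs lo hi ans hlo hhi
      obtain ⟨hb1, hb2, hb3⟩ := PySem.List.bisectLeft_spec A (x + L) hA
      obtain ⟨hc1, hc2, hc3⟩ := PySem.List.bisectRight_spec A (x + R) hA
      have hadvL : solveAdv A (fun y => decide (y < x + L)) lo = PySem.List.bisectLeft A (x + L) := by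
        apply solveAdv_eq A _ _ hb1
        · intro j hj hjc; simpa using hb2 j hj hjc
        · intro j hj hjc; simpa using hb3 j hj hjc
        · exact hlo x (List.mem_cons_self)
      have hadvR : solveAdv A (fun y => decide (y ≤ x + R)) hi = PySem.List.bisectRight A (x + R) := by
        apply solveAdv_eq A _ _ hc1
        · intro j hj hjc; simpa using hc2 j hj hjc
        · intro j hj hjc; simpa using hc3 j hj hjc
        · exact hhi x (List.mem_cons_self)
      simp only [List.foldl_cons, hadvL, hadvR]
      apply ih (List.Pairwise.of_cons hs)
      · intro x' hx'
        exact bisectLeft_mono A hA (by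
          have := (List.pairwise_cons.mp hs).1 x' hx'; omega)
      · intro x' hx'
        exact bisectRight_mono A hA (by
          have := (List.pairwise_cons.mp hs).1 x' hx'; omega)

-- grouping lookup: getD after the modify-append fold (key = second component)
lemma getD_group_snd (l : List (Int × Char)) (d : PySem.Dict Char (List Int)) (c : Char) :
    (l.foldl (fun d p => d.modify p.2 ([] : List Int) (· ++ [p.1])) d).getD c []
      = d.getD c [] ++ (l.filter (fun p => p.2 == c)).map (·.1) := by
  induction l generalizing d with
  | nil => simp
  | cons p t ih =>
      simp only [List.foldl_cons, List.filter_cons]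
      rw [ih]
      by_cases h : p.2 = c
      · subst h
        rw [PySem.Dict.getD_modify_self]
        simp
      · rw [PySem.Dict.getD_modify_of_ne _ _ _ (Ne.symm h)]
        simp [h]

-- every value list of the grouping dict is sorted (indices appear in increasing order)
lemma solveGroup_values_sorted (cs : List Char) :
    ∀ v ∈ (solveGroup cs).values, v.Pairwise (· ≤ ·) := by
  intro v hv
  have hnodup : (solveGroup cs).keys.Nodup := by
    unfold solveGroup
    exact PySem.Dict.nodup_keys_foldl_modify_key _ _ _ _ _ (by simp)
  rw [PySem.Dict.values_eq_map_keys _ hnodup ([] : List Int)] at hv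
  obtain ⟨k, _, rfl⟩ := List.mem_map.mp hv
  unfold solveGroup
  rw [getD_group_snd]
  have hsub : List.Sublist (((PySem.List.enumerate cs 0).filter (fun p => p.2 == k)).map (·.1))
      ((PySem.List.enumerate cs 0).map (·.1)) :=
    List.Sublist.map _ List.filter_sublist
  have hpw : ((PySem.List.enumerate cs 0).map (·.1)).Pairwise (· ≤ ·) := by
    rw [PySem.List.map_fst_enumerate]
    exact (PySem.List.pairwise_lt_pyRange_one _ _).imp (fun h => le_of_lt h)
  simpa using hpw.sublist hsub

-- per-list agreement lifted over the list of value lists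
lemma fold_values_eq (L R : Int) :
    ∀ (vs : List (List Int)), (∀ v ∈ vs, v.Pairwise (· ≤ ·)) → ∀ (ans : Int),
    vs.foldl (fun ans A =>
      (A.foldl (fun (st : Nat × Nat × Int) x =>
        let lo := solveAdv A (fun y => decide (y < x + L)) st.1
        let hi := solveAdv A (fun y => decide (y ≤ x + R)) st.2.1
        (lo, hi, st.2.2 + ((hi : Int) - (lo : Int)))) (0, 0, ans)).2.2) ans
    = vs.foldl (fun ans A =>
        A.foldl (fun ans i =>
          ans + ((PySem.List.bisectRight A (i + R) : Int) - (PySem.List.bisectLeft A (i + L) : Int))) ans) ans := by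
  intro vs
  induction vs with
  | nil => intro _ _; rfl
  | cons A t ih =>
      intro hs ans
      simp only [List.foldl_cons]
      rw [tp_go L R A (hs A List.mem_cons_self) A (hs A List.mem_cons_self) 0 0 ans
        (fun _ _ => Nat.zero_le _) (fun _ _ => Nat.zero_le _)]
      exact ih (fun v hv => hs v (List.mem_cons_of_mem _ hv)) _

-- ===== VERDICT (by name: the statement is the Claim_ definition above) =====
theorem solve_spec : Claim_equal_solve := by
  intro N L R S _
  unfold Spec_solve solve solve_alt
  exact (fold_values_eq L R _ (solveGroup_values_sorted S.toList) 0).symm
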